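-- pv_equiv track=rewrite | github.com/openfisca/calculette-impots-python | calculateur_impots/formulas_helpers.py | has_dependency
-- ===== SOURCE A (Python) =====
-- def has_dependency(formula_name, dependency_formula_names, dependencies_by_formula_name):
--     def walk_dependencies(formula_name, visited_dependencies):
--         if formula_name in visited_dependencies:
--             return False
--         visited_dependencies.add(formula_name)
--         if formula_name in dependency_formula_names:
--             return True
--         formula_dependencies = dependencies_by_formula_name.get(formula_name)
--         if formula_dependencies is not None:
--             for dependency_name in formula_dependencies:
--                 if walk_dependencies(
--                         visited_dependencies=visited_dependencies,
--                         formula_name=dependency_name,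
--                         ):
--                     return True
--         return False
--
--     return walk_dependencies(
--         formula_name=formula_name,
--         visited_dependencies=set(),
--         )
-- ===== SOURCE B (Python) =====
-- def has_dependency(formula_name, dependency_formula_names, dependencies_by_formula_name):
--     visited = set()
--     stack = [formula_name]
--     while stack:
--         node = stack.pop()
--         if node in visited:
--             continue
--         visited.add(node)
--         if node in dependency_formula_names:
--             return True
--         deps = dependencies_by_formula_name.get(node)
--         if deps is not None:
--             stack.extend(reversed(deps))
--     return False
-- ===== Notes on version B (the rewrite author's own statement) =====
-- stated objective: alternative
-- what changed: The recursive walk_dependencies helper is replaced by an iterative depth-first search over an explicit stack with a visited set, removing recursion entirely.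
import Mathlib
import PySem

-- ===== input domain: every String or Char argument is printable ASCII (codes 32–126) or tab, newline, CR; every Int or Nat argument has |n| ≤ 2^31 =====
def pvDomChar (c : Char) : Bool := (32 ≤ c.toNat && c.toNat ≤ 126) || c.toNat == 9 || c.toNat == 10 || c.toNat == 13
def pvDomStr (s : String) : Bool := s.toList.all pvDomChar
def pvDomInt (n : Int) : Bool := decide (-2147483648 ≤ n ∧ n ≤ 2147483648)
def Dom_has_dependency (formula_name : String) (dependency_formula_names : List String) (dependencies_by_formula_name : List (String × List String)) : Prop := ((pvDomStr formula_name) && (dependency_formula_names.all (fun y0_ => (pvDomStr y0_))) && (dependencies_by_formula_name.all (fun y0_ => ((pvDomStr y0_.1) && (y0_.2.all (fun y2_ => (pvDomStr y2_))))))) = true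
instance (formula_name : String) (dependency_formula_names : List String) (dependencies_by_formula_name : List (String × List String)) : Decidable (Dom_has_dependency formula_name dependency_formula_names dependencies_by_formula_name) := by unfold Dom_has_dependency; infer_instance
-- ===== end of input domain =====

-- B replaces A's recursive walk_dependencies helper by an iterative depth-first search over an
-- explicit stack with a visited set (objective: alternative decomposition, same asymptotic cost).
-- Both ports use a fuel counter as the Lean termination device; the top-level fuel
-- (2 + number of dependency names listed in the dict) provably suffices.

-- ===== PORT A =====
-- A's recursion: walk one node (pvWalkA) / the for-loop over its dependency list (pvWalkListA),
-- threading the visited set exactly as walk_dependencies does.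
mutual
def pvWalkA (D : List String) (g : List (String × List String)) : Nat → String → PySem.Set String → Bool × PySem.Set String
  | 0, _, vis => (false, vis)
  | Nat.succ fuel, name, vis =>
    if name ∈ vis then (false, vis)
    else
      if name ∈ D then (true, PySem.Set.add vis name)
      else
        match (PySem.Dict.mk g).get? name with
        | none => (false, PySem.Set.add vis name)
        | some deps => pvWalkListA D g fuel deps (PySem.Set.add vis name)
termination_by fuel _ _ => (fuel, 0)
def pvWalkListA (D : List String) (g : List (String × List String)) : Nat → List String → PySem.Set String → Bool × PySem.Set String
  | _, [], vis => (false, vis)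
  | fuel, d :: rest, vis =>
    match pvWalkA D g fuel d vis with
    | (true, v) => (true, v)
    | (false, v) => pvWalkListA D g fuel rest v
termination_by fuel l _ => (fuel, l.length + 1)
end

def has_dependency (formula_name : String) (dependency_formula_names : List String) (dependencies_by_formula_name : List (String × List String)) : Bool :=
  (pvWalkA dependency_formula_names dependencies_by_formula_name
    ((dependencies_by_formula_name.flatMap Prod.snd).length + 2) formula_name PySem.Set.empty).1

-- ===== PORT B =====
-- B's loop: pop the top of the stack (list head = top of Python's list-as-stack); a visited pop
-- just shrinks the stack, an unvisited pop consumes one unit of fuel.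
def pvStackB (D : List String) (g : List (String × List String)) : Nat → List String → PySem.Set String → Bool
  | _, [], _ => false
  | fuel, node :: rest, vis =>
    if node ∈ vis then pvStackB D g fuel rest vis
    else
      match fuel with
      | 0 => false
      | Nat.succ fuel' =>
        if node ∈ D then true
        else
          match (PySem.Dict.mk g).get? node with
          | none => pvStackB D g fuel' rest (PySem.Set.add vis node)
          | some deps => pvStackB D g fuel' (deps ++ rest) (PySem.Set.add vis node)  -- stack.extend(reversed(deps)) with head = top
termination_by fuel l _ => (fuel, l.length)

def has_dependency_alt (formula_name : String) (dependency_formula_names : List String) (dependencies_by_formula_name : List (String × List String)) : Bool :=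
  pvStackB dependency_formula_names dependencies_by_formula_name
    ((dependencies_by_formula_name.flatMap Prod.snd).length + 2) [formula_name] PySem.Set.empty

-- ===== PRECONDITION & SPEC =====
def Spec_has_dependency (formula_name : String) (dependency_formula_names : List String) (dependencies_by_formula_name : List (String × List String)) (out : Bool) : Prop := out = has_dependency_alt formula_name dependency_formula_names dependencies_by_formula_name
instance (formula_name : String) (dependency_formula_names : List String) (dependencies_by_formula_name : List (String × List String)) (out : Bool) : Decidable (Spec_has_dependency formula_name dependency_formula_names dependencies_by_formula_name out) := by unfold Spec_has_dependency; infer_instance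

-- ===== CLAIM (what is proved, stated in full; the proofs are below) =====
def Claim_equal_has_dependency : Prop := ∀ (formula_name : String) (dependency_formula_names : List String) (dependencies_by_formula_name : List (String × List String)), Dom_has_dependency formula_name dependency_formula_names dependencies_by_formula_name → Spec_has_dependency formula_name dependency_formula_names dependencies_by_formula_name (has_dependency formula_name dependency_formula_names dependencies_by_formula_name)

-- ===== LEMMAS AND PROOFS =====

-- number of elements of U not yet visited; all fuel bounds are in terms of it
def pvCount (U vis : List String) : Nat := (U.filter (fun y => decide (y ∉ vis))).length

theorem pvSet_add_of_not_mem (vis : List String) (x : String) (h : x ∉ vis) :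
    PySem.Set.add vis x = vis ++ [x] := by simp [PySem.Set.add, h]

theorem pvCount_cons (u : String) (t vis : List String) :
    pvCount (u :: t) vis = (if u ∈ vis then 0 else 1) + pvCount t vis := by
  by_cases h : u ∈ vis
  · simp [pvCount, h]
  · simp [pvCount, h]; omega

theorem pvCount_le_of_subset (U vis vis' : List String) (h : vis ⊆ vis') :
    pvCount U vis' ≤ pvCount U vis := by
  apply List.Sublist.length_le
  apply List.monotone_filter_right
  intro a ha
  simp only [decide_eq_true_eq] at ha ⊢
  exact fun hm => ha (h hm)

theorem pvCount_lt (U vis : List String) (x : String) (hxU : x ∈ U) (hxv : x ∉ vis) :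
    pvCount U (vis ++ [x]) < pvCount U vis := by
  induction U with
  | nil => cases hxU
  | cons u t ih =>
    rw [pvCount_cons, pvCount_cons]
    have hle : pvCount t (vis ++ [x]) ≤ pvCount t vis :=
      pvCount_le_of_subset t vis (vis ++ [x]) (fun y hy => List.mem_append_left _ hy)
    rcases List.mem_cons.mp hxU with h | h
    · subst h
      have h1 : x ∈ vis ++ [x] := by simp
      rw [if_pos h1, if_neg hxv]
      omega
    · have := ih h
      by_cases h2 : u ∈ vis
      · rw [if_pos (List.mem_append_left _ h2), if_pos h2]; omega
      · by_cases h1 : u ∈ vis ++ [x] <;> simp only [h1, h2, if_true, if_false] <;> omega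

-- the visited set only grows
theorem pvWalk_mono (D : List String) (g : List (String × List String)) :
    ∀ fuel : Nat,
      (∀ (x : String) (vis : List String), vis ⊆ (pvWalkA D g fuel x vis).2) ∧
      (∀ (l : List String) (vis : List String), vis ⊆ (pvWalkListA D g fuel l vis).2) := by
  intro fuel
  induction fuel with
  | zero =>
    refine ⟨fun x vis => by simp [pvWalkA], ?_⟩
    intro l
    induction l with
    | nil => intro vis; simp [pvWalkListA]
    | cons y ys ih =>
      intro vis
      simp only [pvWalkListA, pvWalkA]
      exact ih vis
  | succ fuel ihf =>
    have hA : ∀ (x : String) (vis : List String), vis ⊆ (pvWalkA D g (fuel + 1) x vis).2 := by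
      intro x vis
      simp only [pvWalkA]
      by_cases hx : x ∈ vis
      · simp only [if_pos hx]
        exact fun y hy => hy
      · simp only [if_neg hx, pvSet_add_of_not_mem vis x hx]
        have hadd : vis ⊆ vis ++ [x] := fun y hy => List.mem_append_left _ hy
        by_cases hD : x ∈ D
        · simp only [if_pos hD]; exact hadd
        · simp only [if_neg hD]
          cases hg : (PySem.Dict.mk g).get? x with
          | none => exact hadd
          | some deps =>
            dsimp only
            exact fun y hy => ihf.2 deps (vis ++ [x]) (hadd hy)
    refine ⟨hA, ?_⟩
    intro l
    induction l with
    | nil => intro vis; simp [pvWalkListA]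
    | cons y ys ih =>
      intro vis
      simp only [pvWalkListA]
      cases hw : pvWalkA D g (fuel + 1) y vis with
      | mk b v =>
        have h1 : vis ⊆ v := by have := hA y vis; rw [hw] at this; exact this
        cases b with
        | true => exact h1
        | false => exact fun z hz => ih v (h1 hz)

-- fuel stability: any two sufficiently large fuels give the same result
theorem pvWalkListA_stable (D : List String) (g : List (String × List String)) (U : List String)
    (hU : ∀ (x : String) (deps : List String), (PySem.Dict.mk g).get? x = some deps → deps ⊆ U) :
    ∀ n : Nat, ∀ (l vis : List String) (fa fa' : Nat),
      pvCount U vis < n → pvCount U vis < fa → pvCount U vis < fa' → (∀ x ∈ l, x ∈ U) →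
      pvWalkListA D g fa l vis = pvWalkListA D g fa' l vis := by
  intro n
  induction n with
  | zero => intro l vis fa fa' h; omega
  | succ n ih =>
    intro l
    induction l with
    | nil => intro vis fa fa' _ _ _ _; simp [pvWalkListA]
    | cons y ys ihl =>
      intro vis fa fa' hn hfa hfa' hl
      have hyU : y ∈ U := hl y List.mem_cons_self
      have hys : ∀ x ∈ ys, x ∈ U := fun x hx => hl x (List.mem_cons_of_mem _ hx)
      obtain ⟨fa1, rfl⟩ : ∃ m, fa = m + 1 := ⟨fa - 1, by omega⟩
      obtain ⟨fa2, rfl⟩ : ∃ m, fa' = m + 1 := ⟨fa' - 1, by omega⟩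
      simp only [pvWalkListA, pvWalkA]
      by_cases hy : y ∈ vis
      · simp only [if_pos hy]
        exact ihl vis (fa1 + 1) (fa2 + 1) hn hfa hfa' hys
      · simp only [if_neg hy, pvSet_add_of_not_mem vis y hy]
        have hlt : pvCount U (vis ++ [y]) < pvCount U vis := pvCount_lt U vis y hyU hy
        by_cases hD : y ∈ D
        · simp only [if_pos hD]
        · simp only [if_neg hD]
          cases hg : (PySem.Dict.mk g).get? y with
          | none =>
            dsimp only
            exact ihl (vis ++ [y]) (fa1 + 1) (fa2 + 1) (by omega) (by omega) (by omega) hys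
          | some deps =>
            dsimp only
            have hdeps : ∀ x ∈ deps, x ∈ U := fun x hx => hU y deps hg hx
            rw [ih deps (vis ++ [y]) fa1 fa2 (by omega) (by omega) (by omega) hdeps]
            cases hw : pvWalkListA D g fa2 deps (vis ++ [y]) with
            | mk b v =>
              cases b with
              | true => rfl
              | false =>
                dsimp only
                have hvsub : (vis ++ [y]) ⊆ v := by
                  have := (pvWalk_mono D g fa2).2 deps (vis ++ [y])
                  rw [hw] at this; exact this
                have hcv : pvCount U v ≤ pvCount U (vis ++ [y]) :=
                  pvCount_le_of_subset U (vis ++ [y]) v hvsub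
                exact ihl v (fa1 + 1) (fa2 + 1) (by omega) (by omega) (by omega) hys

-- splitting A's walk over a concatenated pending list
theorem pvWalkListA_append (D : List String) (g : List (String × List String)) (fa : Nat) :
    ∀ (l1 l2 vis : List String),
      pvWalkListA D g fa (l1 ++ l2) vis =
        match pvWalkListA D g fa l1 vis with
        | (true, v) => (true, v)
        | (false, v) => pvWalkListA D g fa l2 v := by
  intro l1
  induction l1 with
  | nil => intro l2 vis; simp [pvWalkListA]
  | cons y ys ih =>
    intro l2 vis
    simp only [List.cons_append, pvWalkListA]
    cases pvWalkA D g fa y vis with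
    | mk b v => cases b <;> simp [ih]

-- the main simulation: B's stack loop computes A's walk over the pending list
theorem pvMain (D : List String) (g : List (String × List String)) (U : List String)
    (hU : ∀ (x : String) (deps : List String), (PySem.Dict.mk g).get? x = some deps → deps ⊆ U) :
    ∀ n : Nat, ∀ (l vis : List String) (fa fb : Nat),
      pvCount U vis < n → pvCount U vis < fa → pvCount U vis < fb → (∀ x ∈ l, x ∈ U) →
      pvStackB D g fb l vis = (pvWalkListA D g fa l vis).1 := by
  intro n
  induction n with
  | zero => intro l vis fa fb h; omega
  | succ n ih =>
    intro l
    induction l with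
    | nil => intro vis fa fb _ _ _ _; simp [pvStackB, pvWalkListA]
    | cons x rest ihl =>
      intro vis fa fb hn hfa hfb hl
      have hxU : x ∈ U := hl x List.mem_cons_self
      have hrest : ∀ y ∈ rest, y ∈ U := fun y hy => hl y (List.mem_cons_of_mem _ hy)
      obtain ⟨fa1, rfl⟩ : ∃ m, fa = m + 1 := ⟨fa - 1, by omega⟩
      obtain ⟨fb1, rfl⟩ : ∃ m, fb = m + 1 := ⟨fb - 1, by omega⟩
      simp only [pvStackB, pvWalkListA, pvWalkA]
      by_cases hx : x ∈ vis
      · simp only [if_pos hx]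
        exact ihl vis (fa1 + 1) (fb1 + 1) hn hfa hfb hrest
      · simp only [if_neg hx, pvSet_add_of_not_mem vis x hx]
        have hlt : pvCount U (vis ++ [x]) < pvCount U vis := pvCount_lt U vis x hxU hx
        by_cases hD : x ∈ D
        · simp only [if_pos hD]
        · simp only [if_neg hD]
          cases hg : (PySem.Dict.mk g).get? x with
          | none =>
            dsimp only
            exact ihl (vis ++ [x]) (fa1 + 1) fb1 (by omega) (by omega) (by omega) hrest
          | some deps =>
            dsimp only
            have hdeps : ∀ y ∈ deps, y ∈ U := fun y hy => hU x deps hg hy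
            have hall : ∀ y ∈ deps ++ rest, y ∈ U := by
              intro y hy
              rcases List.mem_append.mp hy with h | h
              · exact hdeps y h
              · exact hrest y h
            rw [ih (deps ++ rest) (vis ++ [x]) fa1 fb1 (by omega) (by omega) (by omega) hall,
              pvWalkListA_append]
            cases hw : pvWalkListA D g fa1 deps (vis ++ [x]) with
            | mk b v =>
              cases b with
              | true => rfl
              | false =>
                dsimp only
                have hvsub : (vis ++ [x]) ⊆ v := by
                  have := (pvWalk_mono D g fa1).2 deps (vis ++ [x])
                  rw [hw] at this; exact this
                have hcv : pvCount U v ≤ pvCount U (vis ++ [x]) :=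
                  pvCount_le_of_subset U (vis ++ [x]) v hvsub
                have h1 : pvCount U v < fa1 := by omega
                have h2 : pvCount U v < fa1 + 1 := by omega
                rw [pvWalkListA_stable D g U hU (pvCount U v + 1) rest v fa1 (fa1 + 1)
                  (Nat.lt_succ_self _) h1 h2 hrest]

theorem pvCount_nil (U : List String) : pvCount U [] = U.length := by
  simp [pvCount]

-- ===== VERDICT (by name: the statement is the Claim_ definition above) =====
theorem has_dependency_spec : Claim_equal_has_dependency := by
  intro f D g _
  unfold Spec_has_dependency has_dependency has_dependency_alt
  have hse : (PySem.Set.empty : PySem.Set String) = ([] : List String) := rfl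
  rw [hse]
  set U : List String := f :: g.flatMap Prod.snd with hUdef
  have hU : ∀ (x : String) (deps : List String), (PySem.Dict.mk g).get? x = some deps → deps ⊆ U := by
    intro x deps hg y hy
    right
    simp only [PySem.Dict.get?] at hg
    cases hfind : List.find? (fun p => p.1 == x) g with
    | none => rw [hfind] at hg; cases hg
    | some p =>
      rw [hfind] at hg
      have hp : p ∈ g := List.mem_of_find?_eq_some hfind
      have hpd : p.2 = deps := by simpa using hg
      exact List.mem_flatMap.mpr ⟨p, hp, by rw [hpd]; exact hy⟩
  have hcnt : pvCount U [] = U.length := pvCount_nil U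
  have hlen : U.length = (g.flatMap Prod.snd).length + 1 := by simp [hUdef]
  rw [pvMain D g U hU ((g.flatMap Prod.snd).length + 2) [f] []
    ((g.flatMap Prod.snd).length + 2) ((g.flatMap Prod.snd).length + 2)
    (by omega) (by omega) (by omega)
    (by intro y hy; simp only [List.mem_singleton] at hy; subst hy; exact List.mem_cons_self)]
  simp only [pvWalkListA]
  cases pvWalkA D g ((g.flatMap Prod.snd).length + 2) f [] with
  | mk b v => cases b <;> simp
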